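-- pv_equiv track=rewrite | github.com/suyalji/tutort_assignments | ARRAYS/Assignment_2/coins.py | solution
-- ===== SOURCE A (Python) =====
-- def solution(A):
--     ans = N = len(A)
--     s = 0
--     for i in range(2 * N):
--         s += int(A[i % N]) ^ (i & 1)
--         if i >= N - 1:
--             ans = min(ans, s, N - s)
--             s -= int(A[(i - (N - 1)) % N]) ^ ((i - (N - 1)) & 1)
--     return ans
-- ===== SOURCE B (Python) =====
-- def solution(A):
--     N = len(A)
--     b = [int(A[j % N]) ^ (j & 1) for j in range(2 * N)]
--     P = [0]
--     for x in b:
--         P.append(P[-1] + x)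
--     ans = N
--     for i in range(N - 1, 2 * N):
--         win = P[i + 1] - P[i - (N - 1)]
--         ans = min(ans, win, N - win)
--     return ans
-- ===== Notes on version B (the rewrite author's own statement) =====
-- stated objective: alternative
-- what changed: Replaces the single running sliding-window accumulator with a precomputed doubled 0/1-mismatch array and a prefix-sum table, then a separate window scan that reads each window count as the difference of two prefix entries.
import Mathlib
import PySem

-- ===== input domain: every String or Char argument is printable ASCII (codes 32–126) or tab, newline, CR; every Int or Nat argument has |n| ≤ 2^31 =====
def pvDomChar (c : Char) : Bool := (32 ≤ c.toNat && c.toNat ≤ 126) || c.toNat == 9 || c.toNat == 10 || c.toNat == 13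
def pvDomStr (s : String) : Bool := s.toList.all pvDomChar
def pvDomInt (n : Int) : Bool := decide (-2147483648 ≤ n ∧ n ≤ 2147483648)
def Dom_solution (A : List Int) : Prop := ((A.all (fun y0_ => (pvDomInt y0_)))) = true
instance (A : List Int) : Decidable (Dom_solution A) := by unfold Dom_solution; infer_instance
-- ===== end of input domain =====

-- B replaces A's single running sliding-window accumulator by a doubled array with a
-- prefix-sum table plus a separate window scan (alternative decomposition, same O(n) cost).

-- ===== PORT A =====
-- literal port of A: one pass over range(2N) carrying (ans, s), s the running window sum
def solution (A : List Int) : Int :=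
  let N : Int := (A.length : Int)
  (((PySem.List.pyRange 0 (2*N) 1).foldl
    (fun (st : Int × Int) (i : Int) =>
      let s := st.2 + PySem.Int.bxor (PySem.List.pyGetD A (PySem.Int.mod i N) 0) (PySem.Int.band i 1)
      if N - 1 ≤ i then
        (min (min st.1 s) (N - s),
         s - PySem.Int.bxor (PySem.List.pyGetD A (PySem.Int.mod (i - (N - 1)) N) 0) (PySem.Int.band (i - (N - 1)) 1))
      else (st.1, s))
    (N, 0)).1)

-- ===== PORT B =====
-- literal port of B: doubled array b, prefix sums P built by appending, then a window scan
def solution_alt (A : List Int) : Int :=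
  let N : Int := (A.length : Int)
  let b : List Int := (PySem.List.pyRange 0 (2*N) 1).map
    (fun j => PySem.Int.bxor (PySem.List.pyGetD A (PySem.Int.mod j N) 0) (PySem.Int.band j 1))
  let P : List Int := b.foldl (fun P x => P ++ [PySem.List.pyGetD P (-1) 0 + x]) [0]
  (PySem.List.pyRange (N - 1) (2*N) 1).foldl
    (fun ans i =>
      let win := PySem.List.pyGetD P (i + 1) 0 - PySem.List.pyGetD P (i - (N - 1)) 0
      min (min ans win) (N - win)) N

-- ===== PRECONDITION & SPEC =====
def Spec_solution (A : List Int) (out : Int) : Prop := out = solution_alt A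
instance (A : List Int) (out : Int) : Decidable (Spec_solution A out) := by unfold Spec_solution; infer_instance

-- ===== CLAIM (what is proved, stated in full; the proofs are below) =====
def Claim_equal_solution : Prop := ∀ (A : List Int), Dom_solution A → Spec_solution A (solution A)

-- ===== LEMMAS AND PROOFS =====

-- the per-index 0/1-mismatch term both programs compute
def gfun (A : List Int) (i : Int) : Int :=
  PySem.Int.bxor (PySem.List.pyGetD A (PySem.Int.mod i (A.length : Int)) 0) (PySem.Int.band i 1)

-- prefix sums of gfun over 0..m-1
def Sg (A : List Int) (m : Nat) : Int := ((List.range m).map (fun (j : Nat) => gfun A (j : Int))).sum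

-- pure scan characterizing B's P list
def scanP (a : Int) : List Int → List Int
  | [] => []
  | x :: xs => (a + x) :: scanP (a + x) xs

-- A's loop body, with the common term abbreviated (definitionally equal to solution's lambda)
def stepA (A : List Int) (st : Int × Int) (i : Int) : Int × Int :=
  if (A.length : Int) - 1 ≤ i then
    (min (min st.1 (st.2 + gfun A i)) ((A.length : Int) - (st.2 + gfun A i)),
     st.2 + gfun A i - gfun A (i - ((A.length : Int) - 1)))
  else (st.1, st.2 + gfun A i)

-- the common window step both loops perform in the second phase
def stepW (A : List Int) (ans : Int) (t : Nat) : Int :=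
  min (min ans (Sg A (A.length + t) - Sg A t)) ((A.length : Int) - (Sg A (A.length + t) - Sg A t))

-- A's running window-sum state entering window index t
def Tst (A : List Int) (t : Nat) : Int := Sg A (A.length - 1 + t) - Sg A t

lemma Sg_succ (A : List Int) (m : Nat) : Sg A (m+1) = Sg A m + gfun A (m : Int) := by
  simp [Sg, List.range_succ]

lemma solution_eq_foldl (A : List Int) :
    solution A = (((PySem.List.pyRange 0 (2*(A.length : Int)) 1).foldl (stepA A)
      ((A.length : Int), 0)).1) := rfl

lemma buildP (l : List Int) : ∀ (acc : List Int) (a : Int),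
    PySem.List.pyGetD acc (-1) 0 = a →
    l.foldl (fun P x => P ++ [PySem.List.pyGetD P (-1) 0 + x]) acc = acc ++ scanP a l := by
  induction l with
  | nil => intro acc a _; simp [scanP]
  | cons x xs ih =>
      intro acc a h
      simp only [List.foldl_cons, scanP, h]
      rw [ih (acc ++ [a + x]) (a + x) (PySem.List.pyGetD_neg_one_append_singleton acc (a + x) 0)]
      simp

lemma getD_cons_scanP (l : List Int) : ∀ (a : Int) (k : Nat), k ≤ l.length →
    (a :: scanP a l).getD k 0 = a + (l.take k).sum := by
  induction l with
  | nil =>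
      intro a k hk
      have hk0 : k = 0 := by simpa using hk
      subst hk0
      simp
  | cons x xs ih =>
      intro a k hk
      cases k with
      | zero => simp
      | succ k =>
          simp only [scanP, List.getD_cons_succ, List.take_succ_cons, List.sum_cons]
          rw [ih (a + x) k (by simpa using hk)]
          ring

-- b in range/map form
lemma b_form (A : List Int) :
    (PySem.List.pyRange 0 (2*(A.length : Int)) 1).map
      (fun j => PySem.Int.bxor (PySem.List.pyGetD A (PySem.Int.mod j (A.length : Int)) 0)
        (PySem.Int.band j 1))
      = (List.range (2*A.length)).map (fun (j : Nat) => gfun A (j : Int)) := by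
  rw [PySem.List.pyRange_one]
  have h : ((2*(A.length : Int)) - 0).toNat = 2*A.length := by omega
  rw [h, List.map_map]
  refine List.map_congr_left ?_
  intro j _
  simp [gfun, Function.comp]

lemma Pget (A : List Int) (k : Nat) (hk : k ≤ 2*A.length) :
    PySem.List.pyGetD
      (((List.range (2*A.length)).map (fun (j : Nat) => gfun A (j : Int))).foldl
        (fun P x => P ++ [PySem.List.pyGetD P (-1) 0 + x]) [0]) (k : Int) 0 = Sg A k := by
  rw [buildP _ [0] 0 (by decide)]
  have h0 : ([ (0:Int) ] ++ scanP 0 ((List.range (2*A.length)).map (fun (j : Nat) => gfun A (j : Int))))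
      = (0 : Int) :: scanP 0 ((List.range (2*A.length)).map (fun (j : Nat) => gfun A (j : Int))) := rfl
  rw [h0, PySem.List.pyGetD_natCast]
  rw [getD_cons_scanP _ 0 k (by simpa using hk)]
  rw [← List.map_take, List.take_range]
  have hmin : min k (2*A.length) = k := by omega
  rw [hmin]
  simp [Sg]

lemma B_eq (A : List Int) :
    solution_alt A = (List.range (A.length + 1)).foldl (stepW A) ((A.length : Int)) := by
  have hlen : ((2*(A.length : Int)) - ((A.length : Int) - 1)).toNat = A.length + 1 := by omega
  simp only [solution_alt]
  rw [b_form, PySem.List.pyRange_one ((A.length : Int) - 1) (2*(A.length : Int)), hlen,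
    List.foldl_map]
  refine PySem.List.foldl_congr_mem _ _ _ _ ?_
  intro ans j hj
  have hj' : j ≤ A.length := by
    have := List.mem_range.mp hj; omega
  have e1 : ((A.length : Int) - 1 + (j : Int)) + 1 = ((A.length + j : Nat) : Int) := by
    push_cast; ring
  have e2 : ((A.length : Int) - 1 + (j : Int)) - ((A.length : Int) - 1) = ((j : Nat) : Int) := by
    ring
  simp only [e1, e2]
  rw [Pget A (A.length + j) (by omega), Pget A j (by omega)]
  rfl

lemma phase1 (A : List Int) : ∀ (k : Nat) (a ans s : Int), 0 ≤ a →
    a + (k : Int) ≤ (A.length : Int) - 1 →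
    ((List.range k).map (fun (j : Nat) => a + (j : Int))).foldl (stepA A) (ans, s)
      = (ans, s + ((List.range k).map (fun (j : Nat) => gfun A (a + (j : Int)))).sum) := by
  intro k
  induction k with
  | zero => intro a ans s _ _; simp
  | succ k ih =>
      intro a ans s ha hk
      rw [List.range_succ, List.map_append, List.map_append, List.foldl_append, List.sum_append]
      rw [ih a ans s ha (by push_cast at hk ⊢; omega)]
      simp only [List.map_cons, List.map_nil, List.foldl_cons, List.foldl_nil, List.sum_cons,
        List.sum_nil]
      unfold stepA
      rw [if_neg (by push_cast at hk ⊢; omega)]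
      simp only [Prod.mk.injEq, true_and]
      ring

lemma stepA_window (A : List Int) (h1 : 1 ≤ A.length) (t : Nat) (ans : Int) :
    stepA A (ans, Tst A t) (((A.length : Int) - 1) + (t : Int)) = (stepW A ans t, Tst A (t+1)) := by
  have key : Tst A t + gfun A (((A.length : Int) - 1) + (t : Int))
      = Sg A (A.length + t) - Sg A t := by
    have e1 : ((A.length : Int) - 1) + (t : Int) = ((A.length - 1 + t : Nat) : Int) := by omega
    have e2 : A.length + t = (A.length - 1 + t) + 1 := by omega
    rw [e1]; unfold Tst; rw [e2, Sg_succ]; ring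
  have e3 : (((A.length : Int) - 1) + (t : Int)) - ((A.length : Int) - 1) = ((t : Nat) : Int) := by
    ring
  have e4 : Tst A (t+1) = Sg A (A.length + t) - Sg A (t+1) := by
    unfold Tst
    have : A.length - 1 + (t+1) = A.length + t := by omega
    rw [this]
  unfold stepA stepW
  rw [if_pos (by omega : (A.length : Int) - 1 ≤ ((A.length : Int) - 1) + (t : Int))]
  simp only [Prod.mk.injEq]
  constructor
  · rw [key]
  · rw [e3, key, e4, Sg_succ]; ring

lemma phase2 (A : List Int) (h1 : 1 ≤ A.length) : ∀ (k t : Nat) (ans : Int),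
    (((List.range k).map (fun (j : Nat) => ((A.length : Int) - 1) + (t : Int) + (j : Int))).foldl
      (stepA A) (ans, Tst A t)).1
      = (List.range k).foldl (fun a j => stepW A a (t + j)) ans := by
  intro k
  induction k with
  | zero => intro t ans; simp
  | succ k ih =>
      intro t ans
      rw [List.range_succ_eq_map]
      simp only [List.map_cons, List.foldl_cons, List.map_map, Nat.cast_zero, add_zero]
      rw [stepA_window A h1 t ans]
      have hfun : ((fun j : Nat => ((A.length : Int) - 1) + (t : Int) + (j : Int)) ∘ Nat.succ)
          = (fun j : Nat => ((A.length : Int) - 1) + ((t+1 : Nat) : Int) + (j : Int)) := by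
        funext j
        simp [Function.comp]
        ring
      rw [hfun, ih (t+1) (stepW A ans t), List.foldl_map]
      have hfun2 : (fun (a : Int) (j : Nat) => stepW A a (t + Nat.succ j))
          = (fun (a : Int) (j : Nat) => stepW A a ((t+1) + j)) := by
        funext a j
        congr 1
        omega
      rw [hfun2]

-- ===== VERDICT (by name: the statement is the Claim_ definition above) =====
theorem solution_spec : Claim_equal_solution := by
  intro A _
  unfold Spec_solution
  by_cases hA : A = []
  · subst hA; decide
  · have h1 : 1 ≤ A.length := by
      have := List.length_pos_iff.mpr hA; omega
    rw [B_eq A, solution_eq_foldl]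
    rw [PySem.List.pyRange_one_append 0 ((A.length : Int) - 1) (2*(A.length : Int))
      (by omega) (by omega)]
    rw [List.foldl_append]
    rw [PySem.List.pyRange_one 0 ((A.length : Int) - 1)]
    have hl1 : (((A.length : Int) - 1) - 0).toNat = A.length - 1 := by omega
    rw [hl1]
    rw [phase1 A (A.length - 1) 0 ((A.length : Int)) 0 le_rfl (by omega)]
    have hT0 : (0 : Int) + ((List.range (A.length - 1)).map
        (fun (j : Nat) => gfun A ((0 : Int) + (j : Int)))).sum = Tst A 0 := by
      simp [Tst, Sg]
    rw [hT0]
    rw [PySem.List.pyRange_one ((A.length : Int) - 1) (2*(A.length : Int))]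
    have hl2 : ((2*(A.length : Int)) - ((A.length : Int) - 1)).toNat = A.length + 1 := by omega
    rw [hl2]
    have hmap : (fun k : Nat => ((A.length : Int) - 1) + (k : Int))
        = (fun j : Nat => ((A.length : Int) - 1) + ((0 : Nat) : Int) + (j : Int)) := by
      funext j; push_cast; ring
    rw [hmap, phase2 A h1 (A.length + 1) 0 ((A.length : Int))]
    refine (PySem.List.foldl_congr_mem _ _ _ _ ?_).symm
    intro b a _
    simp
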